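-- pv_equiv track=rewrite | github.com/Egraf99/Running_line | symbols.py | from_up_and_center_to_third
-- ===== SOURCE A (Python) =====
-- def from_up_and_center_to_third(pix_column: list, height: int, symbol_id, order_col) -> list:
--     if height > order_col > (height // 2):
--         for h in range(height):
--             if h <= height // 2 and height - order_col >= height // 4 and order_col < height // 2 * 2:
--                 if h == ((height // 2) - (height - order_col)):
--                     pix_column.append(symbol_id[0])
--                 elif h == (height - order_col):
--                     pix_column.append(symbol_id[1])
--                 else:
--                     pix_column.append(0)
--             else:
--                 pix_column.append(0)
--         return pix_column
-- ===== SOURCE B (Python) =====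
-- def from_up_and_center_to_third(pix_column: list, height: int, symbol_id, order_col) -> list:
--     if height > order_col > height // 2:
--         col = [0] * height
--         p1 = height - order_col
--         p0 = height // 2 - p1
--         if p1 >= height // 4 and order_col < height // 2 * 2 and p1 <= height // 2:
--             col[p0] = symbol_id[0]
--             if p1 != p0:
--                 col[p1] = symbol_id[1]
--         pix_column.extend(col)
--         return pix_column
-- ===== Notes on version B (the rewrite author's own statement) =====
-- stated objective: simpler
-- what changed: B replaces A's per-pixel loop with branch tests at every h by computing the two marked positions p1=height-order_col and p0=height//2-p1 once, building [0]*height and writing the two symbols directly at those indices (col[p0]=symbol_id[0], and col[p1]=symbol_id[1] only when p1!=p0), then extending pix_column with the column.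
import Mathlib
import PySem

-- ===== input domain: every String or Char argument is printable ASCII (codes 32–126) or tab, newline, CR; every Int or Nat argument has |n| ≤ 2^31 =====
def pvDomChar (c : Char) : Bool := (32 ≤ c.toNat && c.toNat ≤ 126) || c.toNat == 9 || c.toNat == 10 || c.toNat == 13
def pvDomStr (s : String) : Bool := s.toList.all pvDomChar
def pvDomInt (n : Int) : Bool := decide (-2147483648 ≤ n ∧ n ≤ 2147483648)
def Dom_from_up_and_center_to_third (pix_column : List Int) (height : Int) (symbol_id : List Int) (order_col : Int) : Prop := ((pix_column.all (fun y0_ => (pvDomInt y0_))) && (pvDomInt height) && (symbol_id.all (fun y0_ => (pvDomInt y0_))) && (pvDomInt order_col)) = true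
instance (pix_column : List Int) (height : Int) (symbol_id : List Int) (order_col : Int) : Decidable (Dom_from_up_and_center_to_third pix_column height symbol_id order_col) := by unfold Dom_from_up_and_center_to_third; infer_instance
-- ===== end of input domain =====

-- B is simpler: instead of A's per-pixel loop re-testing branch conditions at every h, it computes
-- the two marked indices once, builds [0]*height, writes the symbols directly, and extends
-- pix_column (both A and B mutate pix_column in place and return it; equivalence is about the return value).
-- ===== PORT A =====
def from_up_and_center_to_third (pix_column : List Int) (height : Int) (symbol_id : List Int) (order_col : Int) : Option (List Int) :=
  if height > order_col ∧ order_col > PySem.Int.floordiv height 2 then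
    (PySem.List.pyRange 0 height 1).foldl
      (fun acc h => acc.bind fun l =>
        if h ≤ PySem.Int.floordiv height 2 ∧ PySem.Int.floordiv height 4 ≤ height - order_col ∧ order_col < PySem.Int.floordiv height 2 * 2 then
          if h = PySem.Int.floordiv height 2 - (height - order_col) then
            (PySem.List.pyGet? symbol_id 0).map (fun v => l ++ [v])
          else if h = height - order_col then
            (PySem.List.pyGet? symbol_id 1).map (fun v => l ++ [v])
          else some (l ++ [0])
        else some (l ++ [0]))
      (some pix_column)
  else none

-- ===== PORT B =====
-- B: compute the two marked indices once, build [0]*height and write them directly.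
def from_up_and_center_to_third_alt (pix_column : List Int) (height : Int) (symbol_id : List Int) (order_col : Int) : Option (List Int) :=
  if height > order_col ∧ order_col > PySem.Int.floordiv height 2 then
    let col := List.replicate height.toNat (0 : Int)
    let p1 := height - order_col
    let p0 := PySem.Int.floordiv height 2 - p1
    if PySem.Int.floordiv height 4 ≤ p1 ∧ order_col < PySem.Int.floordiv height 2 * 2 ∧ p1 ≤ PySem.Int.floordiv height 2 then
      (PySem.List.pyGet? symbol_id 0).bind fun s0 =>
        let col1 := PySem.List.pySetD col p0 s0
        if p1 ≠ p0 then
          (PySem.List.pyGet? symbol_id 1).map (fun s1 => pix_column ++ PySem.List.pySetD col1 p1 s1)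
        else some (pix_column ++ col1)
    else some (pix_column ++ col)
  else none

-- ===== PRECONDITION & SPEC =====
-- Pre_ excludes exactly the inputs on which A raises IndexError: when the guard and the
-- loop-invariant condition hold and a marked index is reachable, symbol_id must be long enough.
def Pre_from_up_and_center_to_third (pix_column : List Int) (height : Int) (symbol_id : List Int) (order_col : Int) : Prop :=
  (height > order_col ∧ order_col > PySem.Int.floordiv height 2 ∧
   PySem.Int.floordiv height 4 ≤ height - order_col ∧ order_col < PySem.Int.floordiv height 2 * 2 ∧
   height - order_col ≤ PySem.Int.floordiv height 2) →
  (symbol_id ≠ [] ∧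
   (PySem.Int.floordiv height 2 - (height - order_col) ≠ height - order_col → 2 ≤ symbol_id.length))
instance (pix_column : List Int) (height : Int) (symbol_id : List Int) (order_col : Int) : Decidable (Pre_from_up_and_center_to_third pix_column height symbol_id order_col) := by unfold Pre_from_up_and_center_to_third; infer_instance
def pvWitness_from_up_and_center_to_third : List Int × Int × List Int × Int := ([], 8, [7, 9], 5)

def Spec_from_up_and_center_to_third (pix_column : List Int) (height : Int) (symbol_id : List Int) (order_col : Int) (out : Option (List Int)) : Prop := out = from_up_and_center_to_third_alt pix_column height symbol_id order_col
instance (pix_column : List Int) (height : Int) (symbol_id : List Int) (order_col : Int) (out : Option (List Int)) : Decidable (Spec_from_up_and_center_to_third pix_column height symbol_id order_col out) := by unfold Spec_from_up_and_center_to_third; infer_instance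

-- ===== CLAIM (what is proved, stated in full; the proofs are below) =====
def Claim_equal_from_up_and_center_to_third : Prop := ∀ (pix_column : List Int) (height : Int) (symbol_id : List Int) (order_col : Int), Dom_from_up_and_center_to_third pix_column height symbol_id order_col → Pre_from_up_and_center_to_third pix_column height symbol_id order_col → Spec_from_up_and_center_to_third pix_column height symbol_id order_col (from_up_and_center_to_third pix_column height symbol_id order_col)

-- ===== LEMMAS AND PROOFS =====

theorem pvFoldAppend (B : Option (List Int) → Int → Option (List Int)) (v : Int → Int) :
    ∀ (hs : List Int) (acc : List Int),
      (∀ (l : List Int) (h : Int), h ∈ hs → B (some l) h = some (l ++ [v h])) →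
      hs.foldl B (some acc) = some (acc ++ hs.map v)
  | [], acc, _ => by simp
  | h :: hs, acc, hB => by
      simp only [List.foldl_cons, List.map_cons]
      rw [hB acc h (by simp)]
      rw [pvFoldAppend B v hs (acc ++ [v h]) (fun l x hx => hB l x (by simp [hx]))]
      simp

-- ===== VERDICT (by name: the statement is the Claim_ definition above) =====
theorem from_up_and_center_to_third_spec : Claim_equal_from_up_and_center_to_third := by
  intro pix height sid oc _ hpre
  unfold Spec_from_up_and_center_to_third
  unfold from_up_and_center_to_third from_up_and_center_to_third_alt
  have h2 : PySem.Int.floordiv height 2 = height / 2 :=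
    PySem.Int.floordiv_eq_ediv_of_pos (by norm_num)
  have h4 : PySem.Int.floordiv height 4 = height / 4 :=
    PySem.Int.floordiv_eq_ediv_of_pos (by norm_num)
  unfold Pre_from_up_and_center_to_third at hpre
  simp only [h2, h4] at hpre ⊢
  by_cases hg : height > oc ∧ oc > height / 2
  · simp only [if_pos hg]
    have hh3 : (3 : Int) ≤ height := by omega
    set v : Int → Int := fun h =>
      if h ≤ height / 2 ∧ height / 4 ≤ height - oc ∧ oc < height / 2 * 2 then
        (if h = height / 2 - (height - oc) then sid.getD 0 0
         else if h = height - oc then sid.getD 1 0 else 0)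
      else 0 with hvdef
    rw [pvFoldAppend _ v (PySem.List.pyRange 0 height 1) pix ?hyp]
    case hyp =>
      intro l h hmem
      have hr : 0 ≤ h ∧ h < height := by
        have := (PySem.List.mem_pyRange_one).mp hmem; omega
      simp only [hvdef]
      by_cases hC : h ≤ height / 2 ∧ height / 4 ≤ height - oc ∧ oc < height / 2 * 2
      · simp only [if_pos hC]
        by_cases hp0 : h = height / 2 - (height - oc)
        · have hsid : sid ≠ [] := (hpre ⟨hg.1, hg.2, hC.2.1, hC.2.2, by omega⟩).1
          obtain ⟨a, t, rfl⟩ := List.exists_cons_of_ne_nil hsid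
          simp [hp0]
        · by_cases hp1 : h = height - oc
          · have hant : height > oc ∧ oc > height / 2 ∧ height / 4 ≤ height - oc ∧
                oc < height / 2 * 2 ∧ height - oc ≤ height / 2 := by
              refine ⟨hg.1, hg.2, hC.2.1, hC.2.2, by omega⟩
            have hlen : 2 ≤ sid.length := (hpre hant).2 (by omega)
            have hne : sid ≠ [] := by rintro rfl; simp at hlen
            obtain ⟨a, t, rfl⟩ := List.exists_cons_of_ne_nil hne
            have hne2 : t ≠ [] := by rintro rfl; simp at hlen
            obtain ⟨b, t2, rfl⟩ := List.exists_cons_of_ne_nil hne2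
            simp only [hp1] at hp0 ⊢
            simp [hp0, PySem.List.pyGet?, PySem.List.pyIdx?]
          · simp [hp0, hp1]
      · simp [hC]
    by_cases hd : height / 4 ≤ height - oc ∧ oc < height / 2 * 2 ∧ height - oc ≤ height / 2
    · have hsid := hpre ⟨hg.1, hg.2, hd.1, hd.2.1, hd.2.2⟩
      obtain ⟨a, t, rfl⟩ := List.exists_cons_of_ne_nil hsid.1
      have hp0nn : (0:Int) ≤ height / 2 - (height - oc) := by omega
      have hp1nn : (0:Int) ≤ height - oc := by omega
      by_cases hpp : height - oc = height / 2 - (height - oc)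
      · simp only [if_pos hd, PySem.List.pyGet?_zero_cons, Option.bind_some,
          PySem.List.pySetD_of_nonneg _ _ hp0nn, if_neg (not_not_intro hpp)]
        refine congrArg some (congrArg (pix ++ ·) ?_)
        apply List.ext_getElem
        · simp
        · intro i hi1 hi2
          simp only [List.getElem_map, PySem.List.getElem_pyRange_one, List.getElem_set,
            List.getElem_replicate, hvdef, List.getD_cons_zero, List.getD_cons_succ]
          simp only [List.length_map, PySem.List.length_pyRange_one] at hi1
          split_ifs <;> omega
      · have hlen : 2 ≤ (a :: t).length := hsid.2 (Ne.symm hpp)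
        have hne2 : t ≠ [] := by rintro rfl; simp at hlen
        obtain ⟨b, t2, rfl⟩ := List.exists_cons_of_ne_nil hne2
        have hget1 : PySem.List.pyGet? (a :: b :: t2) 1 = some b := by
          simp [PySem.List.pyGet?, PySem.List.pyIdx?]
        simp only [if_pos hd, PySem.List.pyGet?_zero_cons, Option.bind_some, hget1,
          PySem.List.pySetD_of_nonneg _ _ hp0nn, PySem.List.pySetD_of_nonneg _ _ hp1nn,
          if_pos hpp, Option.map_some]
        refine congrArg some (congrArg (pix ++ ·) ?_)
        apply List.ext_getElem
        · simp
        · intro i hi1 hi2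
          simp only [List.getElem_map, PySem.List.getElem_pyRange_one, List.getElem_set,
            List.getElem_replicate, hvdef, List.getD_cons_zero, List.getD_cons_succ]
          simp only [List.length_map, PySem.List.length_pyRange_one] at hi1
          split_ifs <;> omega
    · simp only [if_neg hd]
      refine congrArg some (congrArg (pix ++ ·) ?_)
      apply List.ext_getElem
      · simp
      · intro i hi1 hi2
        simp only [List.getElem_map, PySem.List.getElem_pyRange_one,
          List.getElem_replicate, hvdef]
        simp only [List.length_map, PySem.List.length_pyRange_one] at hi1
        split_ifs <;> omega
  · simp only [if_neg hg]
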